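-- pv_equiv track=rewrite | github.com/dir-Savage/sirat_mustaqeem_db | main.py | calculate_ruku
-- ===== SOURCE A (Python) =====
-- def calculate_ruku(surah, ayah):
--     """Calculate ruku number (simplified algorithm)"""
--     # This is a simplified calculation
--     # In reality, each surah has specific ruku boundaries
--     if surah == 1:
--         return 1
--     elif surah == 2:
--         # Al-Baqarah has 40 rukus
--         ruku_boundaries = [1, 26, 44, 60, 75, 92, 106, 124, 142, 158,
--                           177, 189, 204, 219, 235, 249, 260, 274, 286]
--         for i, boundary in enumerate(ruku_boundaries):
--             if ayah <= boundary:
--                 return i + 1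
--         return 40
--     else:
--         # Generic calculation for other surahs
--         return (ayah - 1) // 10 + 1
-- ===== SOURCE B (Python) =====
-- def calculate_ruku(surah, ayah):
--     """Calculate ruku number (simplified algorithm)"""
--     if surah == 1:
--         return 1
--     elif surah == 2:
--         ruku_boundaries = [1, 26, 44, 60, 75, 92, 106, 124, 142, 158,
--                           177, 189, 204, 219, 235, 249, 260, 274, 286]
--         # binary search: first index i with ayah <= ruku_boundaries[i]
--         lo, hi = 0, len(ruku_boundaries)
--         while lo < hi:
--             mid = (lo + hi) // 2
--             if ruku_boundaries[mid] < ayah: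
--                 lo = mid + 1
--             else:
--                 hi = mid
--         if lo < len(ruku_boundaries):
--             return lo + 1
--         return 40
--     else:
--         return (ayah - 1) // 10 + 1
-- ===== Notes on version B (the rewrite author's own statement) =====
-- stated objective: idiomatic
-- what changed: The surah==2 linear enumerate scan over the ruku boundary list is replaced by a bisect_left-style binary search (first index with ayah <= boundary, falling back to 40).
import Mathlib
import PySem

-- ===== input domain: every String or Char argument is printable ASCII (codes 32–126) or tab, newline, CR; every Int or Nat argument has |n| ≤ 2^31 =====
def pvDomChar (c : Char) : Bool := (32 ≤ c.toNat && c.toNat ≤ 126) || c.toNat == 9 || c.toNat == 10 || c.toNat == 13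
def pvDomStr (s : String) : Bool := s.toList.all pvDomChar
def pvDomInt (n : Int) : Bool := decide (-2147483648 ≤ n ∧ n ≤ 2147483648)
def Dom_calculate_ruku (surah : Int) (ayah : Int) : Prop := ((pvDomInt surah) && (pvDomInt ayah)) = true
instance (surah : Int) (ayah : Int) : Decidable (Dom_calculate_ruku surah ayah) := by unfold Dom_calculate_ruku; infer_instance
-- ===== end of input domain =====

-- B replaces the surah==2 linear enumerate scan with a bisect_left-style binary search (idiomatic; same result).
-- ===== PORT A =====
-- the 'for i, boundary in enumerate(ruku_boundaries): if ayah <= boundary: return i+1' loop, with '40' fallthrough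
def rukuLoopA (ayah : Int) : List Int → Int → Int
  | [], _ => 40
  | b :: rest, i => if ayah ≤ b then i + 1 else rukuLoopA ayah rest (i + 1)

def rukuBoundaries : List Int :=
  [1, 26, 44, 60, 75, 92, 106, 124, 142, 158,
   177, 189, 204, 219, 235, 249, 260, 274, 286]

def calculate_ruku (surah : Int) (ayah : Int) : Int :=
  if surah = 1 then 1
  else if surah = 2 then rukuLoopA ayah rukuBoundaries 0
  else PySem.Int.floordiv (ayah - 1) 10 + 1

-- ===== PORT B =====
-- the 'while lo < hi' bisect_left loop of Source B; fuel = list length (≥ the iteration count; the loop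
-- shrinks hi-lo every step, so 19 units of fuel are never exhausted)
def bisectGo (xs : List Int) (x : Int) : Nat → Nat → Nat → Nat
  | 0, lo, _ => lo
  | fuel + 1, lo, hi =>
    if lo < hi then
      let mid := (lo + hi) / 2
      if xs.getD mid 0 < x then bisectGo xs x fuel (mid + 1) hi
      else bisectGo xs x fuel lo mid
    else lo

def calculate_ruku_alt (surah : Int) (ayah : Int) : Int :=
  if surah = 1 then 1
  else if surah = 2 then
    let lo := bisectGo rukuBoundaries ayah rukuBoundaries.length 0 rukuBoundaries.length
    if lo < rukuBoundaries.length then (lo : Int) + 1 else 40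
  else PySem.Int.floordiv (ayah - 1) 10 + 1

-- ===== PRECONDITION & SPEC =====
def Spec_calculate_ruku (surah : Int) (ayah : Int) (out : Int) : Prop := out = calculate_ruku_alt surah ayah
instance (surah : Int) (ayah : Int) (out : Int) : Decidable (Spec_calculate_ruku surah ayah out) := by unfold Spec_calculate_ruku; infer_instance

-- ===== CLAIM (what is proved, stated in full; the proofs are below) =====
def Claim_equal_calculate_ruku : Prop := ∀ (surah : Int) (ayah : Int), Dom_calculate_ruku surah ayah → Spec_calculate_ruku surah ayah (calculate_ruku surah ayah)

-- ===== LEMMAS AND PROOFS =====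

-- the concrete boundary list is monotone (bounded statement, checked by decide)
theorem rukuBoundaries_mono : ∀ j, j < 19 → ∀ i, i ≤ j →
    rukuBoundaries.getD i 0 ≤ rukuBoundaries.getD j 0 := by decide

theorem rukuBoundaries_length : rukuBoundaries.length = 19 := rfl

-- bisect_left invariant: the returned index separates the elements < x from those ≥ x
theorem bisect_inv (x : Int) : ∀ (fuel lo hi : Nat), lo ≤ hi → hi ≤ 19 → hi - lo ≤ fuel →
    (∀ j, j < lo → rukuBoundaries.getD j 0 < x) →
    (∀ j, hi ≤ j → j < 19 → x ≤ rukuBoundaries.getD j 0) →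
    (∀ j, j < bisectGo rukuBoundaries x fuel lo hi → rukuBoundaries.getD j 0 < x) ∧
    (∀ j, bisectGo rukuBoundaries x fuel lo hi ≤ j → j < 19 → x ≤ rukuBoundaries.getD j 0) ∧
    bisectGo rukuBoundaries x fuel lo hi ≤ 19 := by
  intro fuel
  induction fuel with
  | zero =>
    intro lo hi hlh h19 hfuel h1 h2
    have : lo = hi := by omega
    subst this
    simp only [bisectGo]
    exact ⟨h1, fun j hj => h2 j hj, by omega⟩
  | succ f ih =>
    intro lo hi hlh h19 hfuel h1 h2
    simp only [bisectGo]
    by_cases hcmp : lo < hi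
    · simp only [hcmp, if_true]
      have hmidlo : lo ≤ (lo + hi) / 2 := by omega
      have hmidhi : (lo + hi) / 2 < hi := by omega
      by_cases hlt : rukuBoundaries.getD ((lo + hi) / 2) 0 < x
      · simp only [hlt, if_true]
        refine ih ((lo + hi) / 2 + 1) hi (by omega) h19 (by omega) ?_ h2
        intro j hj
        exact lt_of_le_of_lt (rukuBoundaries_mono ((lo + hi) / 2) (by omega) j (by omega)) hlt
      · simp only [hlt, if_false]
        refine ih lo ((lo + hi) / 2) (by omega) (by omega) (by omega) h1 ?_
        intro j hj hj19
        exact le_trans (le_of_not_gt hlt) (rukuBoundaries_mono j hj19 ((lo + hi) / 2) hj)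
    · simp only [hcmp, if_false]
      have : lo = hi := by omega
      subst this
      exact ⟨h1, fun j hj => h2 j hj, by omega⟩

-- the enumerate loop returns i + k + 1 where k is the first index with x ≤ bs[k], else 40
theorem loop_eval (x : Int) : ∀ (bs : List Int) (k : Nat) (i : Int),
    (∀ j, j < k → bs.getD j 0 < x) →
    (∀ j, k ≤ j → j < bs.length → x ≤ bs.getD j 0) →
    k ≤ bs.length →
    rukuLoopA x bs i = if k < bs.length then i + (k : Int) + 1 else 40 := by
  intro bs
  induction bs with
  | nil =>
    intro k i h1 h2 hk
    simp only [rukuLoopA, List.length_nil]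
    omega
  | cons b rest ihr =>
    intro k i h1 h2 hk
    simp only [rukuLoopA, List.length_cons]
    cases k with
    | zero =>
      have hb : x ≤ b := h2 0 (Nat.le_refl 0) (by simp)
      simp only [if_pos hb]
      simp
    | succ k' =>
      have hb : b < x := h1 0 (Nat.succ_pos k')
      rw [if_neg (by omega)]
      rw [ihr k' (i + 1) (fun j hj => h1 (j + 1) (by omega)) (fun j hj hj2 => h2 (j + 1) (by omega) (by simpa using Nat.succ_lt_succ hj2)) (by simpa using hk)]
      by_cases hkl : k' < rest.length
      · rw [if_pos hkl, if_pos (by omega)]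
        push_cast
        ring
      · rw [if_neg hkl, if_neg (by omega)]

theorem surah2_eq (ayah : Int) : rukuLoopA ayah rukuBoundaries 0 =
    (if bisectGo rukuBoundaries ayah rukuBoundaries.length 0 rukuBoundaries.length < rukuBoundaries.length
     then ((bisectGo rukuBoundaries ayah rukuBoundaries.length 0 rukuBoundaries.length : Nat) : Int) + 1
     else 40) := by
  obtain ⟨h1, h2, h3⟩ := bisect_inv ayah 19 0 19 (by omega) (by omega) (by omega)
    (fun j hj => absurd hj (Nat.not_lt_zero j)) (fun j hj hj19 => absurd (Nat.lt_of_le_of_lt hj hj19) (lt_irrefl 19))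
  rw [rukuBoundaries_length]
  rw [loop_eval ayah rukuBoundaries (bisectGo rukuBoundaries ayah 19 0 19) 0 h1
      (by rw [rukuBoundaries_length]; exact h2) (by rw [rukuBoundaries_length]; exact h3)]
  rw [rukuBoundaries_length]
  by_cases h : bisectGo rukuBoundaries ayah 19 0 19 < 19
  · rw [if_pos h, if_pos h]; ring
  · rw [if_neg h, if_neg h]

-- ===== VERDICT (by name: the statement is the Claim_ definition above) =====
theorem calculate_ruku_spec : Claim_equal_calculate_ruku := by
  intro surah ayah _
  unfold Spec_calculate_ruku calculate_ruku calculate_ruku_alt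
  by_cases h1 : surah = 1
  · simp [h1]
  · by_cases h2 : surah = 2
    · simp only [h2, if_true]
      exact surah2_eq ayah
    · simp [h1, h2]
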